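-- pv_equiv track=rewrite | github.com/120211wq/wq_projects | Xdeas_platform_new/common/Convert.py | getDataLen
-- ===== SOURCE A (Python) =====
-- def getDataLen(data):
--     data_list = []
--     for i in data.keys():
--         if ',' not in data[i]:
--             data_list.append(data[i])
--         else:
--             splits = data[i].split(',')
--             for j in splits:
--                 data_list.append(j)
--     return len(data_list)
-- ===== SOURCE B (Python) =====
-- def getDataLen(data):
--     # one key contributes count(',')+1 split pieces (1 when there is no comma)
--     return len(data) + sum(v.count(',') for v in data.values())
-- ===== Notes on version B (the rewrite author's own statement) =====
-- stated objective: simpler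
-- what changed: B drops A's materialized list of split pieces entirely and computes the length arithmetically as len(data) plus the total number of ',' occurrences in the values (each value contributes count(',')+1 pieces).
import Mathlib
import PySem

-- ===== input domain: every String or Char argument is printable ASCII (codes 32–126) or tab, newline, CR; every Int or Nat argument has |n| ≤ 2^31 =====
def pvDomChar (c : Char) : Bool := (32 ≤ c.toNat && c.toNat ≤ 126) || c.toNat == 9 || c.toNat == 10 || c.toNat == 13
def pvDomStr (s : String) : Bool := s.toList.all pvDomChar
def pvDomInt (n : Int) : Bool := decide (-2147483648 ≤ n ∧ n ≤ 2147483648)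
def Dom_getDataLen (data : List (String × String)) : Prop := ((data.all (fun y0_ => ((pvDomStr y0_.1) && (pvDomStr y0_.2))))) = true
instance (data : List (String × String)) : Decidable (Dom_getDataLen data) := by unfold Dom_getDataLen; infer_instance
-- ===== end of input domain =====

-- B replaces A's build-a-list-of-split-pieces-then-len with direct arithmetic: len(dict) plus the total number of commas in the values (each value yields count(',')+1 pieces).

-- ===== PORT A =====
def getDataLen (data : List (String × String)) : Int :=
  let d := PySem.Dict.ofList data
  let dataList := d.keys.foldl (fun acc i =>
    let v := (d.get? i).getD ""          -- i comes from d.keys, so data[i] always hits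
    if PySem.Str.isIn "," v = false then acc ++ [v]
    else acc ++ (PySem.Str.split? v ",").getD []   -- sep "," ≠ "", so split? is always some
  ) ([] : List String)
  (dataList.length : Int)

-- ===== PORT B =====
def getDataLen_alt (data : List (String × String)) : Int :=
  let d := PySem.Dict.ofList data
  (d.size : Int) + d.values.foldl (fun acc v => acc + (PySem.Str.count v "," : Int)) 0

-- ===== PRECONDITION & SPEC =====
def Spec_getDataLen (data : List (String × String)) (out : Int) : Prop := out = getDataLen_alt data
instance (data : List (String × String)) (out : Int) : Decidable (Spec_getDataLen data out) := by unfold Spec_getDataLen; infer_instance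

-- ===== CLAIM (what is proved, stated in full; the proofs are below) =====
def Claim_equal_getDataLen : Prop := ∀ (data : List (String × String)), Dom_getDataLen data → Spec_getDataLen data (getDataLen data)

-- ===== LEMMAS AND PROOFS =====

-- count.go's accumulator is additive
lemma countGo_acc (sep : List Char) : ∀ (fuel : Nat) (l : List Char) (a : Nat),
    PySem.Chars.count.go sep fuel l a = a + PySem.Chars.count.go sep fuel l 0 := by
  intro fuel
  induction fuel with
  | zero => intro l a; simp [PySem.Chars.count.go]
  | succ n ih =>
    intro l a
    cases l with
    | nil => simp [PySem.Chars.count.go]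
    | cons c t =>
      simp only [PySem.Chars.count.go]
      by_cases h : sep.isPrefixOf (c :: t) = true
      · simp only [h, if_true]
        rw [ih _ (a + 1), ih _ (0 + 1)]
        omega
      · simp [eq_false_of_ne_true h]
        exact ih t a

-- splitOn produces one more piece than the number of separator occurrences
lemma splitGo_length (sep : List Char) (hsep : sep ≠ []) :
    ∀ (fuel : Nat) (l cur : List Char) (acc : List (List Char)), l.length ≤ fuel →
    (PySem.Chars.splitOn.go sep (fuel + 1) l cur acc).length
      = acc.length + 1 + PySem.Chars.count.go sep fuel l 0 := by
  intro fuel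
  induction fuel with
  | zero =>
    intro l cur acc hl
    have : l = [] := List.length_eq_zero_iff.mp (Nat.le_zero.mp hl)
    subst this
    simp [PySem.Chars.splitOn.go, PySem.Chars.count.go]
  | succ n ih =>
    intro l cur acc hl
    cases l with
    | nil => simp [PySem.Chars.splitOn.go, PySem.Chars.count.go]
    | cons c t =>
      simp only [PySem.Chars.splitOn.go, PySem.Chars.count.go]
      have h1 : 1 ≤ sep.length := by
        cases sep with
        | nil => exact absurd rfl hsep
        | cons a b => simp
      by_cases h : sep.isPrefixOf (c :: t) = true
      · simp only [h, if_true]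
        have hdrop : (List.drop sep.length (c :: t)).length ≤ n := by
          simp only [List.length_drop, List.length_cons]
          simp only [List.length_cons] at hl
          omega
        rw [ih _ [] (cur.reverse :: acc) hdrop, countGo_acc sep n _ (0 + 1)]
        simp only [List.length_cons]
        omega
      · have ht : t.length ≤ n := by simp only [List.length_cons] at hl; omega
        simp [eq_false_of_ne_true h, ih t (c :: cur) acc ht]

lemma splitOn_length (s : List Char) (sep : List Char) (hsep : sep ≠ []) :
    (PySem.Chars.splitOn s sep).length = PySem.Chars.count s sep + 1 := by
  have hne : sep.isEmpty = false := by cases sep with | nil => exact absurd rfl hsep | cons a b => rfl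
  unfold PySem.Chars.splitOn PySem.Chars.count
  rw [splitGo_length sep hsep s.length s [] [] (le_refl _)]
  simp [hne]
  omega

-- a separator that does not occur is counted zero times
lemma countGo_not_infix (sep : List Char) :
    ∀ (fuel : Nat) (l : List Char), ¬ sep <:+: l → PySem.Chars.count.go sep fuel l 0 = 0 := by
  intro fuel
  induction fuel with
  | zero => intro l _; simp [PySem.Chars.count.go]
  | succ n ih =>
    intro l hl
    cases l with
    | nil => simp [PySem.Chars.count.go]
    | cons c t =>
      simp only [PySem.Chars.count.go]
      have hpre : sep.isPrefixOf (c :: t) = false := by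
        by_contra h
        exact hl ((List.isPrefixOf_iff_prefix.mp (by revert h; cases sep.isPrefixOf (c :: t) <;> simp)).isInfix)
      simp only [hpre]
      exact ih t (fun h => hl (h.trans (List.suffix_cons c t).isInfix))

lemma count_eq_zero_of_not_isIn (sub s : List Char) (h : PySem.Chars.isIn sub s = false) (hsub : sub ≠ []) :
    PySem.Chars.count s sub = 0 := by
  have hni : ¬ sub <:+: s := by
    intro hinf
    rw [(PySem.Chars.isIn_iff_infix sub s).mpr hinf] at h
    exact Bool.true_eq_false.mp h
  have hne : sub.isEmpty = false := by cases sub with | nil => exact absurd rfl hsub | cons a b => rfl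
  unfold PySem.Chars.count
  simp [hne, countGo_not_infix sub s.length s hni]

-- per stored value: the number of pieces A appends is count(',') + 1
lemma piece_length (v : String) :
    (if PySem.Str.isIn "," v = false then [v] else (PySem.Str.split? v ",").getD []).length
      = PySem.Chars.count v.toList [','] + 1 := by
  by_cases h : PySem.Str.isIn "," v = false
  · simp only [h, if_true, List.length_singleton]
    rw [count_eq_zero_of_not_isIn [','] v.toList (by simpa using h) (by simp)]
  · simp only [h]
    simp [PySem.Str.split?, PySem.Chars.split?, splitOn_length v.toList [','] (by simp)]

-- in a dict with unique keys, looking up the key of any stored pair yields its stored value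
lemma dict_get?_of_mem (d : PySem.Dict String String) (hnd : d.keys.Nodup)
    (p : String × String) (hp : p ∈ d.items) : d.get? p.1 = some p.2 := by
  obtain ⟨items⟩ := d
  simp only [PySem.Dict.keys] at hnd
  induction items with
  | nil => simp at hp
  | cons q rest ih =>
    simp only [PySem.Dict.get?, List.find?]
    rcases List.mem_cons.mp hp with h | h
    · subst h; simp
    · have hne : (q.1 == p.1) = false := by
        have hq : q.1 ≠ p.1 := by
          intro he
          have hm : p.1 ∈ rest.map (·.1) := List.mem_map.mpr ⟨p, h, rfl⟩
          rw [← he] at hm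
          exact (List.nodup_cons.mp (by simpa using hnd)).1 hm
        simpa using hq
      simp only [hne]
      have := ih (by simpa using (List.nodup_cons.mp (by simpa using hnd)).2) h
      simpa [PySem.Dict.get?] using this

lemma flatMap_congr_mem {α β : Type} (l : List α) (f g : α → List β)
    (h : ∀ x ∈ l, f x = g x) : l.flatMap f = l.flatMap g := by
  induction l with
  | nil => rfl
  | cons a t ih => simp [List.flatMap_cons, h a (List.mem_cons_self), ih (fun x hx => h x (List.mem_cons_of_mem a hx))]

lemma sum_pieces (items : List (String × String)) :
    ((items.map (fun p => PySem.Chars.count p.2.toList [','] + 1)).sum : Int)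
      = (items.length : Int) + (items.map (fun p => (PySem.Chars.count p.2.toList [','] : Int))).sum := by
  induction items with
  | nil => simp
  | cons q rest ih =>
    simp only [List.map_cons, List.sum_cons, List.length_cons]
    push_cast
    push_cast at ih
    omega

-- ===== VERDICT (by name: the statement is the Claim_ definition above) =====
theorem getDataLen_spec : Claim_equal_getDataLen := by
  intro data _
  unfold Spec_getDataLen getDataLen getDataLen_alt
  dsimp only
  set d := PySem.Dict.ofList data with hd
  have hfun : (fun (acc : List String) (i : String) =>
      let v := (d.get? i).getD ""
      if PySem.Str.isIn "," v = false then acc ++ [v]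
      else acc ++ (PySem.Str.split? v ",").getD [])
    = (fun acc i => acc ++ (if PySem.Str.isIn "," ((d.get? i).getD "") = false
        then [(d.get? i).getD ""] else (PySem.Str.split? ((d.get? i).getD "") ",").getD [])) := by
    funext acc i
    dsimp only
    split <;> rfl
  rw [hfun, PySem.List.foldl_append_eq_flatMap, PySem.List.foldl_add]
  have hkeys : d.keys = d.items.map (·.1) := rfl
  have hvals : d.values = d.items.map (·.2) := rfl
  rw [hkeys, hvals, List.flatMap_map, List.nil_append, List.map_map]
  rw [flatMap_congr_mem _ _
      (fun p => if PySem.Str.isIn "," p.2 = false then [p.2] else (PySem.Str.split? p.2 ",").getD [])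
      (by
        intro p hp
        have hg := dict_get?_of_mem d (PySem.Dict.nodup_keys_ofList data) p hp
        simp [hg])]
  rw [List.length_flatMap]
  have hmap : d.items.map (fun p =>
      (if PySem.Str.isIn "," p.2 = false then [p.2] else (PySem.Str.split? p.2 ",").getD []).length)
      = d.items.map (fun p => PySem.Chars.count p.2.toList [','] + 1) :=
    List.map_congr_left (fun p _ => piece_length p.2)
  rw [hmap, sum_pieces, zero_add]
  have hcnt : d.items.map ((fun v => (PySem.Str.count v "," : Int)) ∘ fun p : String × String => p.2)
      = d.items.map (fun p => (PySem.Chars.count p.2.toList [','] : Int)) :=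
    List.map_congr_left (fun p _ => by simp)
  rw [hcnt]
  rfl
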